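-- pv_equiv track=rewrite | github.com/yingl/LintCodeInPython | stretch-word.py | stretchWord
-- ===== SOURCE A (Python) =====
-- def stretchWord(S):
--     # write your code here
--     ret = 0
--     pc = None
--     cnt = 0
--     for c in S:
--         if c != pc:
--             pc = c
--             cnt = 0
--             if not ret:
--                 ret = 1
--         else:
--             if cnt >= 1:
--                 continue
--             cnt += 1
--             ret *= 2
--     return ret
-- ===== SOURCE B (Python) =====
-- def stretchWord(S):
--     if not S:
--         return 0
--     pairs = sum(a == b for a, b in zip(S, S[1:]))
--     triples = sum(a == b == c for a, b, c in zip(S, S[1:], S[2:]))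
--     return 2 ** (pairs - triples)
-- ===== Notes on version B (the rewrite author's own statement) =====
-- stated objective: alternative
-- what changed: B replaces A's stateful scan (prev-char, capped counter, repeated doubling) by an inclusion-exclusion identity over positions: each maximal run of length L>=2 contributes exactly (L-1)-(L-2)=1 to (#adjacent equal pairs) - (#adjacent equal triples), so B computes those two pairwise/triplewise counts with zips and returns 2**(pairs-triples), 0 for empty S.
import Mathlib
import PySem

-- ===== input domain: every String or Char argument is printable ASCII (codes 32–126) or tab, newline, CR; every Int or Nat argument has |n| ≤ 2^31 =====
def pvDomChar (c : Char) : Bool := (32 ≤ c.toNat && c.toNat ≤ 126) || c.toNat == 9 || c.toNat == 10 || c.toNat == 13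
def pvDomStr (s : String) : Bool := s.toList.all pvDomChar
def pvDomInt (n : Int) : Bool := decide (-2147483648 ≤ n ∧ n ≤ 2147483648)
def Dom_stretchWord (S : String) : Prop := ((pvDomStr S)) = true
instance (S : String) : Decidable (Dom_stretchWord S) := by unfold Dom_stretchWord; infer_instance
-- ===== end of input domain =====

-- B replaces A's stateful scan by the inclusion-exclusion identity
-- #runs(length ≥ 2) = #(adjacent equal pairs) − #(adjacent equal triples), returning 2^that (0 on "").

-- ===== PORT A =====
-- one loop step of A over its state (ret, pc, cnt)
def stepA (s : Int × Option Char × Int) (c : Char) : Int × Option Char × Int :=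
  let (ret, pc, cnt) := s
  if some c ≠ pc then
    ((if ret = 0 then 1 else ret), some c, 0)
  else if cnt ≥ 1 then
    (ret, pc, cnt)
  else
    (ret * 2, some c, cnt + 1)

def stretchWord (S : String) : Int :=
  (S.toList.foldl stepA (0, none, 0)).1

-- ===== PORT B =====
-- sum(a == b for a, b in zip(S, S[1:])): a sum of booleans is a count
def pairsCnt (l : List Char) : Nat :=
  (l.zip l.tail).countP (fun p => p.1 == p.2)

-- sum(a == b == c for a, b, c in zip(S, S[1:], S[2:])); zip3 written as two zips
def triplesCnt (l : List Char) : Nat :=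
  (l.zip (l.tail.zip l.tail.tail)).countP (fun p => p.1 == p.2.1 && p.2.1 == p.2.2)

def stretchWord_alt (S : String) : Int :=
  if S.toList = [] then 0
  else (2 : Int) ^ (pairsCnt S.toList - triplesCnt S.toList)

-- ===== PRECONDITION & SPEC =====
def Spec_stretchWord (S : String) (out : Int) : Prop := out = stretchWord_alt S
instance (S : String) (out : Int) : Decidable (Spec_stretchWord S out) := by unfold Spec_stretchWord; infer_instance

-- ===== CLAIM (what is proved, stated in full; the proofs are below) =====
def Claim_equal_stretchWord : Prop := ∀ (S : String), Dom_stretchWord S → Spec_stretchWord S (stretchWord S)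

-- ===== LEMMAS AND PROOFS =====

-- number of further doublings A performs, given current char c and whether the
-- current run has already been counted (seen ↔ cnt ≥ 1)
def auxCnt : Char → Bool → List Char → Nat
  | _, _, [] => 0
  | c, seen, d :: t =>
    if d = c then (if seen then auxCnt c seen t else 1 + auxCnt c true t)
    else auxCnt d false t

def seenInt : Bool → Int
  | false => 0
  | true => 1

theorem foldA_pow (l : List Char) : ∀ (c : Char) (seen : Bool) (k : ℕ),
    (l.foldl stepA ((2 : Int) ^ k, some c, seenInt seen)).1
      = 2 ^ (k + auxCnt c seen l) := by
  induction l with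
  | nil => intro c seen k; simp [auxCnt]
  | cons d t ih =>
    intro c seen k
    rw [List.foldl_cons]
    by_cases hdc : d = c
    · subst hdc
      cases seen with
      | false =>
        have hstep : stepA ((2 : Int) ^ k, some d, seenInt false) d
            = ((2 : Int) ^ (k + 1), some d, seenInt true) := by
          simp [stepA, seenInt, pow_succ, mul_comm]
        rw [hstep, ih d true (k + 1)]
        have he : k + 1 + auxCnt d true t = k + auxCnt d false (d :: t) := by
          simp [auxCnt]; omega
        rw [he]
      | true =>
        have hstep : stepA ((2 : Int) ^ k, some d, seenInt true) d
            = ((2 : Int) ^ k, some d, seenInt true) := by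
          simp [stepA, seenInt]
        rw [hstep, ih d true k]
        simp [auxCnt]
    · have hne : (2 : Int) ^ k ≠ 0 := pow_ne_zero _ (by norm_num)
      have hstep : stepA ((2 : Int) ^ k, some c, seenInt seen) d
          = ((2 : Int) ^ k, some d, seenInt false) := by
        cases seen <;> simp [stepA, seenInt, hdc, hne]
      rw [hstep, ih d false k]
      simp [auxCnt, hdc]

theorem pairsCnt_cons_cons (a b : Char) (t : List Char) :
    pairsCnt (a :: b :: t) = (if a = b then 1 else 0) + pairsCnt (b :: t) := by
  simp only [pairsCnt, List.zip_cons_cons, List.tail_cons, List.countP_cons]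
  by_cases h : a = b
  · simp [h]; omega
  · simp [h]

theorem triplesCnt_cons_cons (a b : Char) (t : List Char) :
    triplesCnt (a :: b :: t)
      = (match t with
         | [] => 0
         | c :: _ => if a = b ∧ b = c then 1 else 0) + triplesCnt (b :: t) := by
  cases t with
  | nil => simp [triplesCnt]
  | cons c t' =>
    simp only [triplesCnt, List.zip_cons_cons, List.tail_cons, List.countP_cons]
    by_cases h1 : a = b
    · by_cases h2 : b = c
      · simp [h1, h2]; omega
      · simp [h1, h2]
    · by_cases h2 : b = c
      · simp [h2]; omega
      · simp [h1, h2]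

-- key identity: A's doubling count relates to the pair/triple counts of B
theorem auxCnt_PT (l : List Char) : ∀ c : Char,
    (auxCnt c false l + triplesCnt (c :: l) = pairsCnt (c :: l))
    ∧ (auxCnt c true l + triplesCnt (c :: l)
        + (if l.head? = some c then 1 else 0) = pairsCnt (c :: l)) := by
  induction l with
  | nil => intro c; simp [auxCnt, pairsCnt, triplesCnt]
  | cons d t ih =>
    intro c
    rw [pairsCnt_cons_cons c d t, triplesCnt_cons_cons c d t]
    simp only [auxCnt, List.head?_cons]
    by_cases hdc : d = c
    · subst hdc
      simp only [Bool.false_eq_true, if_neg (fun h : False => h), if_true]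
      cases t with
      | nil => simp [auxCnt, pairsCnt, triplesCnt]
      | cons e t' =>
        have h2 := (ih d).2
        simp only [List.head?_cons] at h2
        by_cases hed : d = e
        · subst hed
          simp only [and_self] at h2 ⊢
          constructor <;> omega
        · simp only [true_and, Option.some.injEq, if_neg hed,
            if_neg (fun h : e = d => hed h.symm)] at h2 ⊢
          constructor <;> omega
    · have h1d := (ih d).1
      have hcd : ¬ c = d := fun h => hdc h.symm
      have hm : (match t with
         | [] => 0
         | c_1 :: _ => if c = d ∧ d = c_1 then 1 else 0) = 0 := by
        cases t with
        | nil => rfl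
        | cons e t' => exact if_neg (fun h => hdc h.1.symm)
      simp only [Option.some.injEq, hm, if_neg hdc, if_neg hcd]
      constructor <;> omega

-- ===== VERDICT (by name: the statement is the Claim_ definition above) =====
theorem stretchWord_spec : Claim_equal_stretchWord := by
  intro S _
  unfold Spec_stretchWord stretchWord stretchWord_alt
  cases h : S.toList with
  | nil => simp
  | cons c l =>
    simp only [reduceCtorEq, if_false]
    have hstep : stepA (0, none, 0) c = ((2 : Int) ^ (0 : ℕ), some c, seenInt false) := by
      simp [stepA, seenInt]
    rw [List.foldl_cons, hstep, foldA_pow l c false 0]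
    have h1 := (auxCnt_PT l c).1
    have he : 0 + auxCnt c false l = pairsCnt (c :: l) - triplesCnt (c :: l) := by omega
    rw [he]
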